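-- pv_equiv track=rewrite | github.com/devyoungk/Algorithm | Python3/프로그래머스/2/42586. 기능개발/기능개발.py | solution
-- ===== SOURCE A (Python) =====
-- def solution(progresses, speeds):
--     answer = []
--     D = [(progresses[i]-100)//speeds[i] * (-1) for i in range(len(speeds))]
--     i = 0
--     j = 1
--     while i < len(D):
--         while j < len(D) and D[i] >= D[j]:
--             j += 1
--             if j == len(D):
--                 break
--         answer.append(j-i)
--         i = j
--         j = i+1
--     return answer
-- ===== SOURCE B (Python) =====
-- def solution(progresses, speeds):
--     days = [(progresses[i] - 100) // speeds[i] * (-1) for i in range(len(speeds))]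
--     # a new deployment starts exactly at each strict prefix-maximum record of days
--     starts = []
--     m = None
--     for i, d in enumerate(days):
--         if m is None or d > m:
--             starts.append(i)
--             m = d
--     starts.append(len(days))
--     return [b - a for a, b in zip(starts, starts[1:])]
-- ===== Notes on version B (the rewrite author's own statement) =====
-- stated objective: alternative
-- what changed: Replaces A's nested two-pointer while-loop group scan by computing the strict prefix-maximum record positions of the day list with a running max and emitting adjacent differences of those boundary indices (plus the final length).
import Mathlib
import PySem

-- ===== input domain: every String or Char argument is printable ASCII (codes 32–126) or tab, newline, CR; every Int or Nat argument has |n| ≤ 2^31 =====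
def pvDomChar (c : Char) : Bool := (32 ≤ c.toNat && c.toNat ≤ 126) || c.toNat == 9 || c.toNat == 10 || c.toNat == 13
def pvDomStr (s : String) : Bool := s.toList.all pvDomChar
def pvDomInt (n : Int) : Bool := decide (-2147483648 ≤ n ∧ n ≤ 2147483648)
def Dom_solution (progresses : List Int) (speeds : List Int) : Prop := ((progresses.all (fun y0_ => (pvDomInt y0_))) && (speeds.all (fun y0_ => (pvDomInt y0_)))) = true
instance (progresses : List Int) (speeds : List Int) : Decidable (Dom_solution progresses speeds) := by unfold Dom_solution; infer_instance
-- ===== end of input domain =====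

-- B replaces A's nested two-pointer group scan by strict prefix-maximum record
-- positions plus adjacent differences of the boundary indices (alternative).

-- ===== PORT A =====
-- D = [(progresses[i]-100)//speeds[i] * (-1) for i in range(len(speeds))]
-- getD is exact here: Pre_solution guarantees i < progresses.length; floordiv is
-- Python's // (Pre_solution guarantees the divisor is nonzero).
def solutionDays (progresses : List Int) (speeds : List Int) : List Int :=
  (List.range speeds.length).map (fun i =>
    PySem.Int.floordiv (progresses.getD i 0 - 100) (speeds.getD i 0) * (-1))

-- inner `while j < len(D) and D[i] >= D[j]: j += 1; if j == len(D): break`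
def solutionInner (D : List Int) (i : Nat) (j : Nat) : Nat :=
  if j < D.length ∧ D.getD i 0 ≥ D.getD j 0 then
    (if j + 1 = D.length then j + 1 else solutionInner D i (j + 1))
  else j
termination_by D.length - j
decreasing_by omega

-- termination helper for the outer loop: j never moves backwards
theorem solutionInner_ge (D : List Int) (i j : Nat) : j ≤ solutionInner D i j := by
  unfold solutionInner
  split
  · split
    · omega
    · have := solutionInner_ge D i (j + 1); omega
  · exact Nat.le_refl j
termination_by D.length - j
decreasing_by omega

-- outer `while i < len(D): … answer.append(j-i); i = j; j = i+1`
def solutionOuter (D : List Int) (i : Nat) (answer : List Int) : List Int :=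
  if _h : i < D.length then
    let j := solutionInner D i (i + 1)
    solutionOuter D j (answer ++ [(j : Int) - (i : Int)])
  else answer
termination_by D.length - i
decreasing_by have := solutionInner_ge D i (i + 1); omega

def solution (progresses : List Int) (speeds : List Int) : List Int :=
  solutionOuter (solutionDays progresses speeds) 0 []

-- ===== PORT B =====
-- same day-list comprehension as A (same raising behaviour, covered by Pre_solution)
def solutionAltDays (progresses : List Int) (speeds : List Int) : List Int :=
  (List.range speeds.length).map (fun i =>
    PySem.Int.floordiv (progresses.getD i 0 - 100) (speeds.getD i 0) * (-1))

-- body of `for i, d in enumerate(days): if m is None or d > m: starts.append(i); m = d`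
def solutionAltStep : (List Int × Option Int) → (Int × Int) → (List Int × Option Int) :=
  fun st id =>
    match st.2 with
    | none => (st.1 ++ [id.1], some id.2)
    | some m => if id.2 > m then (st.1 ++ [id.1], some id.2) else st

def solution_alt (progresses : List Int) (speeds : List Int) : List Int :=
  let days := solutionAltDays progresses speeds
  let r := (PySem.List.enumerate days 0).foldl solutionAltStep ([], none)
  let starts := r.1 ++ [(days.length : Int)]
  -- [b - a for a, b in zip(starts, starts[1:])]
  (List.zip starts (PySem.List.slice starts (some 1) none)).map (fun ab => ab.2 - ab.1)

-- ===== PRECONDITION & SPEC =====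
-- Pre_ excludes exactly the inputs where Python A raises: progresses shorter than
-- speeds (IndexError building D) or a zero speed (ZeroDivisionError).
def Pre_solution (progresses : List Int) (speeds : List Int) : Prop :=
  speeds.length ≤ progresses.length ∧ ∀ x ∈ speeds, x ≠ 0

instance (progresses : List Int) (speeds : List Int) : Decidable (Pre_solution progresses speeds) := by
  unfold Pre_solution; infer_instance

def pvWitness_solution : List Int × List Int := ([93, 30, 55], [1, 30, 5])

def Spec_solution (progresses : List Int) (speeds : List Int) (out : List Int) : Prop := out = solution_alt progresses speeds
instance (progresses : List Int) (speeds : List Int) (out : List Int) : Decidable (Spec_solution progresses speeds out) := by unfold Spec_solution; infer_instance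

-- ===== CLAIM (what is proved, stated in full; the proofs are below) =====
def Claim_equal_solution : Prop := ∀ (progresses : List Int) (speeds : List Int), Dom_solution progresses speeds → Pre_solution progresses speeds → Spec_solution progresses speeds (solution progresses speeds)

-- ===== LEMMAS AND PROOFS =====

-- reference grouping function: group sizes of maximal runs ≤ the run's first element
def grp : List Int → List Int
  | [] => []
  | d :: rest =>
    (((rest.takeWhile (fun x => decide (x ≤ d))).length : Int) + 1) ::
      grp (rest.drop (rest.takeWhile (fun x => decide (x ≤ d))).length)
termination_by l => l.length
decreasing_by simp

theorem solutionInner_eq (D : List Int) (i j : Nat) :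
    solutionInner D i j = j + ((D.drop j).takeWhile (fun x => decide (x ≤ D.getD i 0))).length := by
  fun_induction solutionInner D i j with
  | case1 j h hl =>
    have hdrop : D.drop j = D[j]'h.1 :: D.drop (j + 1) := List.drop_eq_getElem_cons h.1
    have hget : D.getD j 0 = D[j]'h.1 := List.getD_eq_getElem D 0 h.1
    rw [hdrop, List.takeWhile_cons_of_pos (by simp only [decide_eq_true_eq]; rw [← hget]; exact h.2)]
    have : D.drop (j + 1) = [] := List.drop_eq_nil_of_le (by omega)
    simp [this]
  | case2 j h hl ih =>
    have hdrop : D.drop j = D[j]'h.1 :: D.drop (j + 1) := List.drop_eq_getElem_cons h.1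
    have hget : D.getD j 0 = D[j]'h.1 := List.getD_eq_getElem D 0 h.1
    rw [ih, hdrop, List.takeWhile_cons_of_pos (by simp only [decide_eq_true_eq]; rw [← hget]; exact h.2)]
    simp; omega
  | case3 j h =>
    by_cases hj : j < D.length
    · have hdrop : D.drop j = D[j]'hj :: D.drop (j + 1) := List.drop_eq_getElem_cons hj
      have hget : D.getD j 0 = D[j]'hj := List.getD_eq_getElem D 0 hj
      have hne : ¬ (D.getD i 0 ≥ D.getD j 0) := fun hb => h ⟨hj, hb⟩
      rw [hdrop, List.takeWhile_cons_of_neg (by simp only [decide_eq_true_eq]; rw [← hget]; omega)]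
      simp
    · have : D.drop j = [] := List.drop_eq_nil_of_le (by omega)
      simp [this]

theorem solutionOuter_eq (D : List Int) (i : Nat) (answer : List Int) :
    solutionOuter D i answer = answer ++ grp (D.drop i) := by
  fun_induction solutionOuter D i answer with
  | case1 i answer h j ih =>
    have hj : j = i + 1 + ((D.drop (i + 1)).takeWhile (fun x => decide (x ≤ D.getD i 0))).length :=
      solutionInner_eq D i (i + 1)
    have hdrop : D.drop i = D[i]'h :: D.drop (i + 1) := List.drop_eq_getElem_cons h
    have hget : D.getD i 0 = D[i]'h := List.getD_eq_getElem D 0 h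
    rw [ih, hdrop, grp, ← hget, List.append_assoc, List.singleton_append, List.drop_drop]
    congr 2
    · rw [hj]; push_cast; ring
    · congr 1; rw [hj]
  | case2 i answer h =>
    have : D.drop i = [] := List.drop_eq_nil_of_le (by omega)
    simp [this, grp]

-- proof-side model of B's record loop: indices of strict prefix-max records
def startsAux (m : Int) (i : Int) : List Int → List Int
  | [] => []
  | d :: tl => if d > m then i :: startsAux d (i + 1) tl else startsAux m (i + 1) tl

-- proof-side model of B's adjacent-difference pass
def diffsFrom (p : Int) : List Int → List Int
  | [] => []
  | x :: xs => (x - p) :: diffsFrom x xs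

theorem foldl_solutionAltStep_some (L : List Int) (i : Int) (m : Int) (acc : List Int) :
    ((PySem.List.enumerate L i).foldl solutionAltStep (acc, some m)).1 = acc ++ startsAux m i L := by
  induction L generalizing i m acc with
  | nil => simp [PySem.List.enumerate_nil, startsAux]
  | cons d tl ih =>
    rw [PySem.List.enumerate_cons]
    by_cases hd : d > m
    · simp only [List.foldl_cons, solutionAltStep, hd, if_true, startsAux]
      rw [ih]; simp
    · simp only [List.foldl_cons, solutionAltStep, hd, if_false, startsAux]
      rw [ih]

theorem diffsFrom_startsAux (L : List Int) (m prev i : Int) :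
    diffsFrom prev (startsAux m i L ++ [i + (L.length : Int)]) =
      (i - prev + ((L.takeWhile (fun x => decide (x ≤ m))).length : Int)) ::
        grp (L.drop (L.takeWhile (fun x => decide (x ≤ m))).length) := by
  induction L generalizing m prev i with
  | nil => simp [startsAux, diffsFrom, grp]
  | cons x tl ih =>
    by_cases hx : x > m
    · have hne : ¬ (x ≤ m) := by omega
      rw [startsAux, if_pos hx,
        List.takeWhile_cons_of_neg (by simpa using hne)]
      simp only [List.length_nil, List.drop_zero, List.cons_append, diffsFrom]
      have := ih (m := x) (prev := i) (i := i + 1)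
      rw [show i + ((x :: tl).length : Int) = (i + 1) + (tl.length : Int) by simp; ring,
        this, grp]
      push_cast
      congr 2 <;> ring
    · have hle : x ≤ m := by omega
      rw [startsAux, if_neg hx,
        List.takeWhile_cons_of_pos (by simpa using hle)]
      simp only [List.length_cons, List.drop_succ_cons]
      have := ih (m := m) (prev := prev) (i := i + 1)
      rw [show (i + (((tl.length + 1 : Nat)) : Int)) = (i + 1) + (tl.length : Int) by push_cast; ring,
        this]
      congr 1
      push_cast; ring

theorem zip_tail_diffs (l : List Int) (p : Int) :
    (List.zip (p :: l) l).map (fun ab : Int × Int => ab.2 - ab.1) = diffsFrom p l := by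
  induction l generalizing p with
  | nil => rfl
  | cons x xs ih => simp [List.zip_cons_cons, diffsFrom, ih]

theorem solution_alt_eq_grp (progresses speeds : List Int) :
    solution_alt progresses speeds = grp (solutionAltDays progresses speeds) := by
  unfold solution_alt
  cases hD : solutionAltDays progresses speeds with
  | nil =>
    simp only [PySem.List.enumerate_nil, List.foldl_nil, grp]
    rfl
  | cons d rest =>
    simp only [PySem.List.enumerate_cons, List.foldl_cons]
    rw [show solutionAltStep ([], none) (0, d) = ([(0 : Int)], some d) from rfl,
      show (0 : Int) + 1 = 1 from rfl]
    rw [foldl_solutionAltStep_some rest 1 d [(0 : Int)]]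
    rw [show ([(0 : Int)] ++ startsAux d 1 rest) ++ [((d :: rest).length : Int)] =
        (0 : Int) :: (startsAux d 1 rest ++ [((d :: rest).length : Int)]) by simp]
    rw [PySem.List.slice_from_one, List.tail_cons, zip_tail_diffs,
      show ((d :: rest).length : Int) = 1 + (rest.length : Int) by simp; ring,
      diffsFrom_startsAux, grp]
    congr 1
    ring_nf

-- ===== VERDICT (by name: the statement is the Claim_ definition above) =====
theorem solution_spec : Claim_equal_solution := by
  intro p s _ _
  unfold Spec_solution solution
  rw [solutionOuter_eq, solution_alt_eq_grp]
  have : solutionDays p s = solutionAltDays p s := rfl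
  simp [this]
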